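-- pv_equiv track=rewrite | github.com/sandheepgopinath/Code-Repository | DSA/FinalQuiz1/.ipynb_checkpoints/p2-checkpoint.py | special_order
-- ===== SOURCE A (Python) =====
-- def bubble_sort(l):
--     end_pointer=len(l)-1
--     for i in range(end_pointer,-1,-1):
--         for j in range(0,i):
--             if l[j]>=l[j+1]:
--                 temp=l[j]
--                 l[j]=l[j+1]
--                 l[j+1]=temp
--     return l
--
-- def  special_order(set):
--     l=bubble_sort(set)
--     output=[]
--
--     for i in range(len(l)):
--         j=len(l)-1-i
--         if i<j:
--             output.append(l[i])
--             output.append(l[j])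
--
--     # Reversing the order
--     out=[]
--     for i in range(len(output)-1,-1,-1):
--         out.append(output[i])
--     return out
-- ===== SOURCE B (Python) =====
-- from collections import deque
--
-- def special_order(set):
--     d = deque(sorted(set))
--     out = deque()
--     while len(d) > 1:
--         lo = d.popleft()
--         hi = d.pop()
--         out.appendleft(lo)
--         out.appendleft(hi)
--     return list(out)
-- ===== Notes on version B (the rewrite author's own statement) =====
-- stated objective: faster
-- what changed: Replaces bubble-sort plus an index-loop interleave and a separate reversal pass by consuming a deque of the sorted values from both ends (popleft/pop) and prepending each (hi, lo) pair, so the result is built directly in final order with no interleave list and no reversal (note: A sorts its argument in place, B does not mutate it; the equivalence is about the return value).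
import Mathlib
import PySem

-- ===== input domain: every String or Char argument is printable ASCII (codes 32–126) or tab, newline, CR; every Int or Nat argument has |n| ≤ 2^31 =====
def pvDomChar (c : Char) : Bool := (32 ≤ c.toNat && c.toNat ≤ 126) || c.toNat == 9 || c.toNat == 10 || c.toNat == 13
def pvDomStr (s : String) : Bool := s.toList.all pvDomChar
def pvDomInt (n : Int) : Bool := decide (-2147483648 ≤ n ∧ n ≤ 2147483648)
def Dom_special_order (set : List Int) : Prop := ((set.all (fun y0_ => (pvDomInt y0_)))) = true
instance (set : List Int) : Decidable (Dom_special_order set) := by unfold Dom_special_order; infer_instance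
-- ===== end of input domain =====

-- B replaces A's hand-written bubble sort, index-loop interleave and separate reversal pass by consuming
-- a deque of the sorted values from both ends and prepending each (hi, lo) pair, building the result
-- directly in final order (equivalence is about the RETURN value: A sorts its list argument in place, B does not mutate it).


-- ===== PORT A =====
-- inner loop 'for j in range(0,i)': walk left to right carrying the larger of each adjacent pair, i steps
def pvBubblePass : List Int → Nat → List Int
  | x :: y :: rest, Nat.succ k =>
      if x ≥ y then y :: pvBubblePass (x :: rest) k
      else x :: pvBubblePass (y :: rest) k
  | xs, _ => xs

def bubble_sort (l : List Int) : List Int :=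
  (PySem.List.pyRange (PySem.List.len l - 1) (-1) (-1)).foldl
    (fun acc i => pvBubblePass acc i.toNat) l

def special_order (set : List Int) : List Int :=
  let l := bubble_sort set
  let output := (PySem.List.pyRange 0 (PySem.List.len l) 1).foldl
    (fun out i =>
      let j := PySem.List.len l - 1 - i
      if i < j then (out ++ [PySem.List.pyGetD l i 0]) ++ [PySem.List.pyGetD l j 0]
      else out) []
  -- Reversing the order
  let out := (PySem.List.pyRange (PySem.List.len output - 1) (-1) (-1)).foldl
    (fun acc i => acc ++ [PySem.List.pyGetD output i 0]) []
  out

-- ===== PORT B =====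
-- 'while len(d) > 1: lo = d.popleft(); hi = d.pop(); out.appendleft(lo); out.appendleft(hi)'
-- (the deque d is a list consumed at both ends; out is a list extended at the front)
def pvSoLoop : List Int → List Int → List Int
  | [], out => out
  | [_], out => out
  | lo :: x :: xs, out =>
      pvSoLoop ((x :: xs).dropLast) (((x :: xs).getLast (by simp)) :: lo :: out)
termination_by d _ => d.length
decreasing_by simp

def special_order_alt (set : List Int) : List Int :=
  pvSoLoop (PySem.List.sorted set (fun x => x) false) []

-- ===== PRECONDITION & SPEC =====
def Spec_special_order (set : List Int) (out : List Int) : Prop := out = special_order_alt set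
instance (set : List Int) (out : List Int) : Decidable (Spec_special_order set out) := by unfold Spec_special_order; infer_instance

-- ===== CLAIM (what is proved, stated in full; the proofs are below) =====
def Claim_equal_special_order : Prop := ∀ (set : List Int), Dom_special_order set → Spec_special_order set (special_order set)

-- ===== LEMMAS AND PROOFS =====

-- One inner pass splits as: k processed elements, the carried maximum of the first k+1, the untouched tail.
lemma pvBubblePass_spec : ∀ (k : Nat) (xs : List Int), k < xs.length →
    ∃ pre c, pvBubblePass xs k = pre ++ c :: xs.drop (k+1) ∧ pre.length = k ∧
      (pre ++ [c]).Perm (xs.take (k+1)) ∧ (∀ a ∈ xs.take (k+1), a ≤ c) := by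
  intro k
  induction k with
  | zero =>
    intro xs h
    rcases xs with _ | ⟨x, t⟩
    · simp at h
    · refine ⟨[], x, ?_, rfl, by simp, by simp⟩
      rcases t with _ | ⟨y, r⟩ <;> simp [pvBubblePass]
  | succ k ih =>
    intro xs h
    rcases xs with _ | ⟨x, _ | ⟨y, rest⟩⟩
    · simp at h
    · simp at h
    · simp only [List.length_cons] at h
      by_cases hxy : x ≥ y
      · obtain ⟨pre, c, he, hl, hp, hb⟩ := ih (x :: rest) (by simp; omega)
        simp only [List.take_succ_cons, List.drop_succ_cons] at hp hb he
        refine ⟨y :: pre, c, ?_, by simp [hl], ?_, ?_⟩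
        · simp [pvBubblePass, hxy, he]
        · simp only [List.take_succ_cons, List.cons_append]
          exact (hp.cons y).trans (List.Perm.swap x y _)
        · intro a ha
          simp only [List.take_succ_cons, List.mem_cons] at ha hb
          rcases ha with rfl | rfl | ha
          · exact hb a (Or.inl rfl)
          · exact le_trans hxy (hb x (Or.inl rfl))
          · exact hb a (Or.inr ha)
      · obtain ⟨pre, c, he, hl, hp, hb⟩ := ih (y :: rest) (by simp; omega)
        simp only [List.take_succ_cons, List.drop_succ_cons] at hp hb he
        refine ⟨x :: pre, c, ?_, by simp [hl], ?_, ?_⟩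
        · simp [pvBubblePass, hxy, he]
        · simp only [List.take_succ_cons, List.cons_append]
          exact hp.cons x
        · intro a ha
          simp only [List.take_succ_cons, List.mem_cons] at ha hb
          rcases ha with rfl | rfl | ha
          · exact le_trans (le_of_not_ge hxy) (hb y (Or.inl rfl))
          · exact hb a (Or.inl rfl)
          · exact hb a (Or.inr ha)

-- Outer loop: countdown over i = k-1, …, 0, with the sorted-and-dominating-suffix invariant.
lemma pvOuter_spec : ∀ (k : Nat) (l : List Int), k ≤ l.length →
    (l.drop k).Pairwise (· ≤ ·) →
    (∀ a ∈ l.take k, ∀ b ∈ l.drop k, a ≤ b) →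
    ((PySem.List.pyRange ((k : Int) - 1) (-1) (-1)).foldl
        (fun acc i => pvBubblePass acc i.toNat) l).Perm l ∧
    ((PySem.List.pyRange ((k : Int) - 1) (-1) (-1)).foldl
        (fun acc i => pvBubblePass acc i.toNat) l).Pairwise (· ≤ ·) := by
  intro k
  induction k with
  | zero =>
    intro l _ hs _
    rw [PySem.List.pyRange_neg_one_eq_nil (by norm_num)]
    simpa using hs
  | succ k ih =>
    intro l hk hs hd
    have hcast : ((k + 1 : Nat) : Int) - 1 = (k : Int) := by push_cast; ring
    rw [hcast, PySem.List.pyRange_neg_one_cons (by omega)]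
    simp only [List.foldl_cons, Int.toNat_natCast]
    obtain ⟨pre, c, he, hl, hp, hb⟩ := pvBubblePass_spec k l (by omega)
    rw [he]
    have hmemc : c ∈ l.take (k+1) := hp.mem_iff.mp (by simp)
    have hpre : ∀ a ∈ pre, a ∈ l.take (k+1) := fun a ha => hp.mem_iff.mp (by simp [ha])
    have hdropd : (pre ++ c :: l.drop (k+1)).drop k = c :: l.drop (k+1) := by
      rw [← hl]; exact List.drop_left
    have htaked : (pre ++ c :: l.drop (k+1)).take k = pre := by
      rw [← hl]; exact List.take_left
    have hlen : (pre ++ c :: l.drop (k+1)).length = l.length := by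
      have := List.length_take_of_le (show k+1 ≤ l.length by omega) ▸ hp.length_eq
      simp at this ⊢
      omega
    have h1 : ((pre ++ c :: l.drop (k+1)).drop k).Pairwise (· ≤ ·) := by
      rw [hdropd]
      exact List.Pairwise.cons (fun b hbmem => hd c hmemc b hbmem) hs
    have h2 : ∀ a ∈ (pre ++ c :: l.drop (k+1)).take k,
        ∀ b ∈ (pre ++ c :: l.drop (k+1)).drop k, a ≤ b := by
      rw [hdropd, htaked]
      intro a ha b hbm
      rcases List.mem_cons.mp hbm with rfl | hbm
      · exact hb a (hpre a ha)
      · exact hd a (hpre a ha) b hbm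
    obtain ⟨hperm, hpair⟩ := ih (pre ++ c :: l.drop (k+1)) (by omega) h1 h2
    have hpl : (pre ++ c :: l.drop (k+1)).Perm l := by
      have h0 : pre ++ c :: l.drop (k+1) = (pre ++ [c]) ++ l.drop (k+1) := by simp
      rw [h0]
      exact (hp.append_right _).trans (List.Perm.of_eq (List.take_append_drop _ l))
    exact ⟨hperm.trans hpl, hpair⟩

lemma bubble_sort_eq_sorted (l : List Int) :
    bubble_sort l = PySem.List.sorted l (fun x => x) false := by
  obtain ⟨hperm, hpair⟩ := pvOuter_spec l.length l le_rfl (by simp) (by simp)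
  unfold bubble_sort
  rw [PySem.List.len_eq]
  exact (PySem.List.sorted_id_eq_of_perm_of_pairwise l _ hperm hpair).symm

-- A's conditional double-append loop, as filter + flatMap
lemma pvFoldl_append_if2 {α β : Type} (p : α → Prop) [DecidablePred p] (f g : α → β)
    (l : List α) (acc : List β) :
    l.foldl (fun acc x => if p x then acc ++ [f x, g x] else acc) acc
      = acc ++ (l.filter (fun x => decide (p x))).flatMap (fun x => [f x, g x]) := by
  induction l generalizing acc with
  | nil => simp
  | cons x t ih => by_cases h : p x <;> simp [h, ih]

-- A's hand-written reversal loop is List.reverse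
lemma pvRevLoop (o : List Int) :
    (PySem.List.pyRange ((o.length : Int) - 1) (-1) (-1)).foldl
      (fun acc i => acc ++ [PySem.List.pyGetD o i 0]) [] = o.reverse := by
  rw [PySem.List.foldl_append_singleton_eq_map, PySem.List.pyRange_neg_one_eq_reverse]
  have h1 : (-1 : Int) + 1 = 0 := by norm_num
  have h2 : (o.length : Int) - 1 + 1 = (o.length : Int) := by ring
  rw [h1, h2, List.map_reverse, PySem.List.map_pyGetD_pyRange_zero']
  simp

-- A's guard i < n-1-i keeps exactly i = 0, …, n/2 - 1
lemma pvFilter_range (n : Nat) :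
    (PySem.List.pyRange 0 (n : Int) 1).filter (fun i => decide (i < (n : Int) - 1 - i))
      = PySem.List.pyRange 0 ((n / 2 : Nat) : Int) 1 := by
  rw [PySem.List.pyRange_one_append 0 ((n / 2 : Nat) : Int) (n : Int) (by omega)
    (by exact_mod_cast Nat.div_le_self n 2)]
  rw [List.filter_append]
  have e1 : (PySem.List.pyRange 0 ((n / 2 : Nat) : Int) 1).filter
      (fun i => decide (i < (n : Int) - 1 - i)) = PySem.List.pyRange 0 ((n / 2 : Nat) : Int) 1 := by
    apply List.filter_eq_self.mpr
    intro i hi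
    have := PySem.List.mem_pyRange_one.mp hi
    simp only [decide_eq_true_eq]
    omega
  have e2 : (PySem.List.pyRange ((n / 2 : Nat) : Int) (n : Int) 1).filter
      (fun i => decide (i < (n : Int) - 1 - i)) = [] := by
    apply List.filter_eq_nil_iff.mpr
    intro i hi
    have := PySem.List.mem_pyRange_one.mp hi
    simp only [decide_eq_true_eq]
    omega
  rw [e1, e2, List.append_nil]

-- the interleave [s0, s_{n-1}, s1, s_{n-2}, …] written as a peel-both-ends recursion (proof-side)
def pvPairs : List Int → List Int
  | [] => []
  | [_] => []
  | lo :: x :: xs =>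
      lo :: ((x :: xs).getLast (by simp)) :: pvPairs ((x :: xs).dropLast)
termination_by d => d.length
decreasing_by simp

-- A's index-built interleave equals the peel-both-ends recursion
lemma pvPairs_eq : ∀ (s : List Int),
    (List.range (s.length / 2)).flatMap
        (fun k => [s.getD k 0, s.getD (s.length - 1 - k) 0]) = pvPairs s := by
  intro s
  induction s using pvPairs.induct with
  | case1 => simp [pvPairs]
  | case2 a => simp [pvPairs]
  | case3 lo x xs ih =>
    have hmid : (x :: xs).dropLast ++ [(x :: xs).getLast (by simp)] = x :: xs :=
      List.dropLast_append_getLast (by simp)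
    set hi := (x :: xs).getLast (by simp) with hhi
    set mid := (x :: xs).dropLast with hmidd
    have hml : mid.length = xs.length := by simp [hmidd]
    have hlen : (lo :: x :: xs).length = xs.length + 2 := by simp
    have hdiv : (xs.length + 2) / 2 = xs.length / 2 + 1 := by omega
    rw [hlen, hdiv, List.range_succ_eq_map]
    simp only [List.flatMap_cons, List.flatMap_map]
    have h0 : (lo :: x :: xs).getD 0 0 = lo := rfl
    have hlast : (lo :: x :: xs).getD (xs.length + 2 - 1 - 0) 0 = hi := by
      rw [List.getD_eq_getElem _ _ (by simp)]
      have : (lo :: x :: xs).getLast (by simp) = hi := by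
        simp [hhi, List.getLast_cons]
      rw [← this, List.getLast_eq_getElem]
      exact getElem_congr rfl (by simp) (by simp)
    rw [h0, hlast]
    have hrest : ∀ k ∈ List.range (xs.length / 2),
        (fun a => [(lo :: x :: xs).getD a.succ 0,
            (lo :: x :: xs).getD (xs.length + 2 - 1 - a.succ) 0]) k
          = (fun k => [mid.getD k 0, mid.getD (mid.length - 1 - k) 0]) k := by
      intro k hk
      have hk' : k < xs.length / 2 := List.mem_range.mp hk
      have hmidl : mid.length = xs.length := hml
      simp only [Nat.succ_eq_add_one]
      congr 1
      · -- s.getD (k+1) = mid.getD k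
        rw [List.getD_eq_getElem?_getD, List.getD_eq_getElem?_getD]
        rw [List.getElem?_cons_succ, ← hmid,
          List.getElem?_append_left (by omega)]
      · -- s.getD (n-2-k) = mid.getD (mid.length-1-k)
        congr 1
        rw [List.getD_eq_getElem?_getD, List.getD_eq_getElem?_getD]
        have h1 : xs.length + 2 - 1 - (k + 1) = (xs.length - k - 1) + 1 := by omega
        rw [h1, List.getElem?_cons_succ, ← hmid,
          List.getElem?_append_left (by omega)]
        have h3 : mid.length - 1 - k = xs.length - k - 1 := by omega
        rw [h3]
    rw [List.flatMap_def, List.map_congr_left hrest, ← List.flatMap_def]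
    conv_lhs => rw [← hml]
    rw [ih]
    conv_rhs => rw [pvPairs]
    rfl

-- B's two-ended loop reverses the peel and prepends onto its accumulator
lemma pvSoLoop_eq : ∀ (d out : List Int), pvSoLoop d out = (pvPairs d).reverse ++ out := by
  intro d
  induction d using pvPairs.induct with
  | case1 => intro out; simp [pvSoLoop, pvPairs]
  | case2 a => intro out; simp [pvSoLoop, pvPairs]
  | case3 lo x xs ih =>
    intro out
    rw [pvSoLoop, pvPairs, ih]
    simp

-- on the SAME (sorted) list s, A's pair-and-reverse loops equal B's two-ended loop
lemma pvCore (s : List Int) :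
    (let output := (PySem.List.pyRange 0 (PySem.List.len s) 1).foldl
      (fun out i =>
        let j := PySem.List.len s - 1 - i
        if i < j then (out ++ [PySem.List.pyGetD s i 0]) ++ [PySem.List.pyGetD s j 0]
        else out) [];
     (PySem.List.pyRange (PySem.List.len output - 1) (-1) (-1)).foldl
      (fun acc i => acc ++ [PySem.List.pyGetD output i 0]) [])
    = pvSoLoop s [] := by
  simp only [PySem.List.len_eq, List.append_assoc, List.singleton_append]
  rw [pvFoldl_append_if2 (fun i => i < (s.length : Int) - 1 - i)
      (fun i => PySem.List.pyGetD s i 0) (fun i => PySem.List.pyGetD s ((s.length : Int) - 1 - i) 0)]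
  rw [List.nil_append, pvFilter_range s.length, pvRevLoop]
  rw [pvSoLoop_eq, List.append_nil]
  congr 1
  rw [← pvPairs_eq s]
  rw [PySem.List.pyRange_one]
  have h0 : (((s.length / 2 : Nat) : Int) - 0).toNat = s.length / 2 := by omega
  rw [h0, List.flatMap_def, List.flatMap_def]
  simp only [List.map_map]
  congr 1
  apply List.map_congr_left
  intro k hk
  have hk' : k < s.length / 2 := List.mem_range.mp hk
  have hc : (s.length : Int) - 1 - (k : Int) = ((s.length - 1 - k : Nat) : Int) := by omega
  simp only [Function.comp_apply, zero_add]
  rw [hc]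
  simp only [PySem.List.pyGetD_natCast]

lemma special_order_eq (set : List Int) : special_order set = special_order_alt set := by
  unfold special_order special_order_alt
  rw [bubble_sort_eq_sorted]
  exact pvCore (PySem.List.sorted set (fun x => x) false)

-- ===== VERDICT (by name: the statement is the Claim_ definition above) =====
theorem special_order_spec : Claim_equal_special_order := by
  intro set _
  unfold Spec_special_order
  exact special_order_eq set
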